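-- pv_equiv track=rewrite | github.com/yijingf/Sonata-Struct-GEN | src/data_pipeline/autoStruc/struct_segment.py | merge_sub_sect_name
-- ===== SOURCE A (Python) =====
-- def merge_sub_sect_name(sub_sects):
--     """Merge sub-section with same prefix, such as A, A1, A, A2 into one section [A, A1], [A, A2]
--
--     Args:
--         sub_sects (list): a list of subsection
--
--     Returns:
--         list: list of sub section lists, e.g. [[A, A2], [B, A2]]
--     """
--     sect, sects = [], []
--     last_sub_sect = sub_sects[0]
--
--     for sub_sect in sub_sects:
--
--         if sub_sect[0] != last_sub_sect[0] or len(sub_sect) < len(last_sub_sect):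
--             sects.append(sect)
--             sect = [sub_sect]
--         else:
--             sect.append(sub_sect)
--         last_sub_sect = sub_sect
--
--     if sect:
--         sects.append(sect)
--
--     return sects
-- ===== SOURCE B (Python) =====
-- def merge_sub_sect_name(sub_sects):
--     """Two staged passes: first collect the cut positions (where the leading char
--     changes or the name gets shorter), then slice the list between consecutive cuts."""
--     n = len(sub_sects)
--     cuts = [0] + [i for i in range(1, n)
--                   if sub_sects[i][0] != sub_sects[i - 1][0]
--                   or len(sub_sects[i]) < len(sub_sects[i - 1])] + [n]
--     return [sub_sects[a:b] for a, b in zip(cuts, cuts[1:])]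
-- ===== Notes on version B (the rewrite author's own statement) =====
-- stated objective: alternative
-- what changed: B replaces A's single forward loop with a mutable group accumulator, last-element variable and trailing flush by two staged passes: it first collects all cut positions (indices where the leading character changes or the name shortens) and then partitions the list by slicing between consecutive cuts.
import Mathlib
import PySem

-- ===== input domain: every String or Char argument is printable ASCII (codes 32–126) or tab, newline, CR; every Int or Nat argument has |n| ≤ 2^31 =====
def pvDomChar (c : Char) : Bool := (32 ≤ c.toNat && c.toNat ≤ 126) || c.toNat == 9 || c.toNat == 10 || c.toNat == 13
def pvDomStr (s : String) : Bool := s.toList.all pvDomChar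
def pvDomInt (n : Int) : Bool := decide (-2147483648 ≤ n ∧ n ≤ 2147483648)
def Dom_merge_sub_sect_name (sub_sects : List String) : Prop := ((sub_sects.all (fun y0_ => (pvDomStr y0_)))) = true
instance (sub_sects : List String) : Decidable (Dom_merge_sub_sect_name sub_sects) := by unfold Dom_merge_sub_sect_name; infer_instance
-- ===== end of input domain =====

-- B replaces A's forward loop (accumulator + last-element variable + final flush) by two staged
-- passes: collect all cut indices first, then slice the list between consecutive cuts; same cost.


-- ===== PORT A =====
-- the break test: sub_sect[0] != last_sub_sect[0] or len(sub_sect) < len(last_sub_sect)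
-- (s[0] is PySem.Str.pyGet? s 0; under Pre_ every string is non-empty so it is `some`, exactly Python)
def pvBrkA (last_sub_sect sub_sect : String) : Bool :=
  (PySem.Str.pyGet? sub_sect 0 != PySem.Str.pyGet? last_sub_sect 0)
    || decide (PySem.Str.len sub_sect < PySem.Str.len last_sub_sect)

-- loop body of A: state = (sect, sects, last_sub_sect)
def pvStepA (st : List String × List (List String) × String) (sub_sect : String) :
    List String × List (List String) × String :=
  if pvBrkA st.2.2 sub_sect then ([sub_sect], st.2.1 ++ [st.1], sub_sect)
  else (st.1 ++ [sub_sect], st.2.1, sub_sect)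

def merge_sub_sect_name (sub_sects : List String) : List (List String) :=
  match PySem.List.pyGet? sub_sects 0 with
  | none => []  -- Python raises IndexError here (sub_sects[0] on []); excluded by Pre_
  | some last0 =>
    let st := sub_sects.foldl pvStepA ([], [], last0)
    if st.1.isEmpty then st.2.1 else st.2.1 ++ [st.1]

-- ===== PORT B =====
-- the filter condition of the comprehension: sub_sects[i][0] != sub_sects[i-1][0]
-- or len(sub_sects[i]) < len(sub_sects[i-1])
def pvCut (sub_sects : List String) (i : Int) : Bool :=
  match PySem.List.pyGet? sub_sects i, PySem.List.pyGet? sub_sects (i - 1) with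
  | some cur, some prev =>
      (PySem.Str.pyGet? cur 0 != PySem.Str.pyGet? prev 0)
        || decide (PySem.Str.len cur < PySem.Str.len prev)
  | _, _ => false  -- unreachable: i is drawn from range(1, n), both indices in range

def merge_sub_sect_name_alt (sub_sects : List String) : List (List String) :=
  let n : Int := sub_sects.length
  let cuts : List Int := 0 :: (PySem.List.pyRange 1 n 1).filter (pvCut sub_sects) ++ [n]
  (cuts.zip cuts.tail).map (fun p => PySem.List.slice sub_sects (some p.1) (some p.2))

-- ===== PRECONDITION & SPEC =====
-- Python A raises IndexError on the empty list (sub_sects[0]) and whenever some element is the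
-- empty string (sub_sect[0]); Pre_ admits exactly the inputs where A returns.
def Pre_merge_sub_sect_name (sub_sects : List String) : Prop :=
  sub_sects ≠ [] ∧ ∀ s ∈ sub_sects, s ≠ ""
instance (sub_sects : List String) : Decidable (Pre_merge_sub_sect_name sub_sects) := by
  unfold Pre_merge_sub_sect_name; infer_instance

def pvWitness_merge_sub_sect_name : List String := ["A", "A1", "A", "A2", "B"]

def Spec_merge_sub_sect_name (sub_sects : List String) (out : List (List String)) : Prop := out = merge_sub_sect_name_alt sub_sects
instance (sub_sects : List String) (out : List (List String)) : Decidable (Spec_merge_sub_sect_name sub_sects out) := by unfold Spec_merge_sub_sect_name; infer_instance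

-- ===== CLAIM (what is proved, stated in full; the proofs are below) =====
def Claim_equal_merge_sub_sect_name : Prop := ∀ (sub_sects : List String), Dom_merge_sub_sect_name sub_sects → Pre_merge_sub_sect_name sub_sects → Spec_merge_sub_sect_name sub_sects (merge_sub_sect_name sub_sects)

-- ===== LEMMAS AND PROOFS =====

-- canonical grouping: grpT a rest = (elements of rest glued to a's group, the remaining groups)
def grpT : String → List String → List String × List (List String)
  | _, [] => ([], [])
  | a, b :: rest =>
    let r := grpT b rest
    if pvBrkA a b then ([], (b :: r.1) :: r.2) else (b :: r.1, r.2)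

theorem pvBrkA_self (a : String) : pvBrkA a a = false := by simp [pvBrkA]

theorem loopA (rest : List String) : ∀ (a : String) (sect : List String) (sects : List (List String)),
    sect ≠ [] →
    (if (List.foldl pvStepA (sect, sects, a) rest).1.isEmpty
       then (List.foldl pvStepA (sect, sects, a) rest).2.1
       else (List.foldl pvStepA (sect, sects, a) rest).2.1 ++ [(List.foldl pvStepA (sect, sects, a) rest).1])
      = sects ++ (sect ++ (grpT a rest).1) :: (grpT a rest).2 := by
  induction rest with
  | nil =>
    intro a sect sects hs
    simp [grpT, List.isEmpty_iff, hs]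
  | cons b rest ih =>
    intro a sect sects hs
    rw [List.foldl_cons]
    by_cases h : pvBrkA a b
    · rw [show pvStepA (sect, sects, a) b = ([b], sects ++ [sect], b) from by simp [pvStepA, h]]
      rw [ih b [b] (sects ++ [sect]) (List.cons_ne_nil _ _)]
      simp [grpT, h]
    · rw [show pvStepA (sect, sects, a) b = (sect ++ [b], sects, b) from by simp [pvStepA, h]]
      rw [ih b (sect ++ [b]) sects (by simp)]
      simp [grpT, h]

-- ===== B side: Nat-level cut positions and slicing =====

-- Nat-level form of pvCut: a break between positions k and k+1
def cutN (l : List String) (k : Nat) : Bool :=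
  match l[k+1]?, l[k]? with
  | some cur, some prev => pvBrkA prev cur
  | _, _ => false

-- the cut positions (each ≥ 1), defined by recursion on the list
def breaksN : List String → List Nat
  | a :: b :: rest => (if pvBrkA a b then [1] else []) ++ (breaksN (b :: rest)).map (· + 1)
  | _ => []

-- slicing between consecutive Nat cuts
def sliceG (l : List String) (cs : List Nat) : List (List String) :=
  (cs.zip cs.tail).map (fun p => (l.drop p.1).take (p.2 - p.1))

theorem sliceG_cons (l : List String) (x y : Nat) (cs : List Nat) :
    sliceG l (x :: y :: cs) = (l.drop x).take (y - x) :: sliceG l (y :: cs) := rfl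

theorem cutN_shift (x : String) (l : List String) (k : Nat) :
    cutN (x :: l) (k + 1) = cutN l k := by
  simp [cutN]

theorem cutN_zero (a b : String) (rest : List String) :
    cutN (a :: b :: rest) 0 = pvBrkA a b := by
  simp [cutN]

theorem pvCut_natCast (l : List String) (k : Nat) :
    pvCut l (1 + (k : Int)) = cutN l k := by
  have h1 : (1 + (k : Int)) = ((k + 1 : Nat) : Int) := by push_cast; ring
  rw [pvCut, h1]
  rw [show ((k + 1 : Nat) : Int) - 1 = ((k : Nat) : Int) by omega]
  rw [PySem.List.pyGet?_natCast, PySem.List.pyGet?_natCast]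
  rfl

theorem filter_map_succ (p : Nat → Bool) (r : List Nat) :
    (r.map (· + 1)).filter p = (r.filter (fun k => p (k + 1))).map (· + 1) := by
  induction r with
  | nil => rfl
  | cons x xs ih => by_cases h : p (x + 1) <;> simp [h, ih]

theorem breaksN_eq_filter : ∀ (l : List String),
    breaksN l = ((List.range (l.length - 1)).filter (cutN l)).map (· + 1) := by
  intro l
  induction l using breaksN.induct with
  | case1 a b rest ih =>
    rw [breaksN, ih]
    rw [show (a :: b :: rest).length - 1 = rest.length + 1 by simp]
    rw [show (b :: rest).length - 1 = rest.length by simp]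
    rw [List.range_succ_eq_map, List.filter_cons, cutN_zero]
    rw [show (List.range rest.length).map Nat.succ = (List.range rest.length).map (· + 1) from rfl]
    rw [filter_map_succ]
    rw [show (fun k => cutN (a :: b :: rest) (k + 1)) = cutN (b :: rest) from funext (cutN_shift a _)]
    by_cases h : pvBrkA a b <;> simp [h, List.map_map]
  | case2 l h =>
    match l, h with
    | [], _ => rfl
    | [a], _ => rfl
    | a :: b :: rest, h => exact (h a b rest rfl).elim

theorem filter_eq_breaksN (l : List String) :
    (PySem.List.pyRange 1 (l.length : Int) 1).filter (pvCut l)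
      = (breaksN l).map (fun k : Nat => (k : Int)) := by
  rw [PySem.List.pyRange_one, breaksN_eq_filter]
  rw [show ((l.length : Int) - 1).toNat = l.length - 1 by omega]
  rw [List.filter_map]
  rw [show (pvCut l ∘ fun k : Nat => 1 + (k : Int)) = cutN l from funext fun k => pvCut_natCast l k]
  rw [List.map_map]
  refine List.map_congr_left fun k _ => ?_
  simp only [Function.comp_apply]
  push_cast
  ring

-- shifting all cuts by one skips the head element
theorem sliceG_shift (a : String) (l : List String) : ∀ (cs : List Nat) (x : Nat),
    sliceG (a :: l) ((x + 1) :: cs.map (· + 1)) = sliceG l (x :: cs) := by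
  intro cs
  induction cs with
  | nil => intro x; simp [sliceG]
  | cons y ys ih =>
    intro x
    rw [List.map_cons, sliceG_cons, sliceG_cons, ih y]
    congr 1
    simp [Nat.add_sub_add_right]

theorem sliceG_main : ∀ (rest : List String) (a : String),
    sliceG (a :: rest) (0 :: breaksN (a :: rest) ++ [rest.length + 1])
      = (a :: (grpT a rest).1) :: (grpT a rest).2 := by
  intro rest
  induction rest with
  | nil => intro a; simp [breaksN, sliceG, grpT]
  | cons b rest ih =>
    intro a
    obtain ⟨c0, cs1, hc⟩ : ∃ c0 cs1, breaksN (b :: rest) ++ [rest.length + 1] = c0 :: cs1 := by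
      cases hx : breaksN (b :: rest) ++ [rest.length + 1] with
      | nil => exact absurd hx (by simp)
      | cons c0 cs1 => exact ⟨c0, cs1, rfl⟩
    have hIH : sliceG (b :: rest) (0 :: c0 :: cs1)
        = (b :: (grpT b rest).1) :: (grpT b rest).2 := by
      have h0 := ih b
      rw [List.cons_append, hc] at h0
      exact h0
    have hsplit : ((b :: rest).drop 0).take (c0 - 0) :: sliceG (b :: rest) (c0 :: cs1)
        = (b :: (grpT b rest).1) :: (grpT b rest).2 := by
      rw [← sliceG_cons]; exact hIH
    injection hsplit with hg1 hg2
    have key : breaksN (a :: b :: rest) ++ [(b :: rest).length + 1]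
        = (if pvBrkA a b then [1] else []) ++ (c0 :: cs1).map (· + 1) := by
      rw [← hc]
      rw [show breaksN (a :: b :: rest)
          = (if pvBrkA a b then [1] else []) ++ (breaksN (b :: rest)).map (· + 1) from rfl]
      rw [List.append_assoc, List.map_append]
      simp
    rw [List.cons_append, key]
    by_cases h : pvBrkA a b
    · rw [if_pos h, List.singleton_append, sliceG_cons]
      have hs0 := sliceG_shift a (b :: rest) (c0 :: cs1) 0
      rw [Nat.zero_add] at hs0
      rw [hs0, hIH]
      simp [grpT, h]
    · rw [if_neg h, List.nil_append, List.map_cons, sliceG_cons]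
      rw [sliceG_shift a (b :: rest) cs1 c0, hg2]
      simp only [List.drop_zero, Nat.sub_zero, List.take_succ_cons]
      rw [show (b :: rest).take c0 = b :: (grpT b rest).1 from by simpa using hg1]
      simp [grpT, h]

-- ===== VERDICT (by name: the statement is the Claim_ definition above) =====
theorem merge_sub_sect_name_spec : Claim_equal_merge_sub_sect_name := by
  intro sub_sects _ hpre
  unfold Spec_merge_sub_sect_name
  obtain ⟨hne, -⟩ := hpre
  obtain ⟨b, rest, rfl⟩ : ∃ b rest, sub_sects = b :: rest := by
    cases sub_sects with
    | nil => exact absurd rfl hne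
    | cons b rest => exact ⟨b, rest, rfl⟩
  have hA : merge_sub_sect_name (b :: rest)
      = (b :: (grpT b rest).1) :: (grpT b rest).2 := by
    unfold merge_sub_sect_name
    rw [PySem.List.pyGet?_zero_cons]
    simp only [List.foldl_cons]
    rw [show pvStepA ([], [], b) b = ([b], [], b) from by simp [pvStepA, pvBrkA_self]]
    rw [loopA rest b [b] [] (List.cons_ne_nil _ _)]
    simp
  have hB : merge_sub_sect_name_alt (b :: rest)
      = (b :: (grpT b rest).1) :: (grpT b rest).2 := by
    simp only [merge_sub_sect_name_alt]
    rw [filter_eq_breaksN]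
    have hcast : (0 : Int) :: (breaksN (b :: rest)).map (fun k : Nat => (k : Int))
          ++ [((b :: rest).length : Int)]
        = ((0 :: breaksN (b :: rest) ++ [rest.length + 1]).map (fun k : Nat => (k : Int))) := by
      simp
    rw [hcast]
    have hzip : ∀ (cs : List Nat),
        (((cs.map (fun k : Nat => (k : Int))).zip
            ((cs.map (fun k : Nat => (k : Int)))).tail).map
            (fun p => PySem.List.slice (b :: rest) (some p.1) (some p.2)))
          = sliceG (b :: rest) cs := by
      intro cs
      rw [sliceG, ← List.map_tail, List.zip_map, List.map_map]
      refine List.map_congr_left fun p _ => ?_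
      simp [PySem.List.slice_natCast]
    rw [hzip, sliceG_main]
  rw [hA, hB]
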